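-- pv_equiv track=rewrite | github.com/ebicochineal/yukicoderlocaltest | yukicoderlocaltest.py | problemnumber
-- ===== SOURCE A (Python) =====
-- def problemnumber(filename):
--     num = ""
--     for i in filename:
--         if i in "0123456789":
--             num += i
--         elif len(num) > 0:
--             if i == "." : break
--             num = ""
--     if len(num) > 4:
--         num = num[-4:]
--     return num if len(num) > 0 else None
-- ===== SOURCE B (Python) =====
-- def problemnumber(filename):
--     # Scan maximal digit runs: pick the first run immediately followed by '.'
--     # (or the trailing run at end of string); keep its last 4 digits.
--     chars = list(filename)
--     n = len(chars)
--     num = ""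
--     i = 0
--     while i < n:
--         if chars[i] in "0123456789":
--             j = i
--             while j < n and chars[j] in "0123456789":
--                 j += 1
--             if j == n or chars[j] == ".":
--                 num = filename[i:j]
--                 break
--             i = j
--         else:
--             i += 1
--     if len(num) > 4:
--         num = num[-4:]
--     return num if len(num) > 0 else None
-- ===== Notes on version B (the rewrite author's own statement) =====
-- stated objective: idiomatic
-- what changed: Replaced A's char-by-char accumulate/reset state machine with a two-level scan over maximal digit runs that picks the first run immediately followed by '.' (or the trailing run) and slices it directly from the string.
import Mathlib
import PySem

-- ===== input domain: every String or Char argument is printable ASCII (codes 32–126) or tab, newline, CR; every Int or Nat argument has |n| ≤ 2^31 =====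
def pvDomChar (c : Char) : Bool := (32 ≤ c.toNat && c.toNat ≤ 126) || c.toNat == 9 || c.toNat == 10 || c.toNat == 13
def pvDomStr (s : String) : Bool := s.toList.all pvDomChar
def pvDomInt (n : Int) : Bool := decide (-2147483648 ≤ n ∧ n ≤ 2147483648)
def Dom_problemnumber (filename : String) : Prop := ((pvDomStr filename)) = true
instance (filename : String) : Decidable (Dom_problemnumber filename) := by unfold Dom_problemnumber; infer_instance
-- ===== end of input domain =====

-- B replaces A's char-by-char accumulate/reset state machine by a maximal-digit-run
-- scanner (idiomatic two-level scan); same return value on every input.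

def pvIsDig (c : Char) : Bool := c ∈ "0123456789".toList

-- ===== PORT A =====
-- the for-loop of A: state 'num' accumulates digits; reset on other chars, break on '.'
def pvALoop : List Char → List Char → List Char
  | [], num => num
  | c :: rest, num =>
    if pvIsDig c then pvALoop rest (num ++ [c])
    else if num.length > 0 then
      (if c = '.' then num else pvALoop rest [])
    else pvALoop rest num

def problemnumber (filename : String) : Option String :=
  let num := pvALoop filename.toList []
  -- num[-4:] on a list of length > 4 is its last 4 elements
  let num := if num.length > 4 then num.drop (num.length - 4) else num
  if num.length > 0 then some (String.mk num) else none

-- ===== PORT B =====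
-- Source B's outer while with inner digit-run while: the inner 'while j' advance is
-- takeWhile/dropWhile over the digit run; break when the run ends at '.' or at the end.
def pvBLoop : List Char → List Char
  | [] => []
  | c :: rest =>
    if pvIsDig c then
      let run := (c :: rest).takeWhile pvIsDig
      match _hm : (c :: rest).dropWhile pvIsDig with
      | [] => run
      | d :: tl => if d = '.' then run else pvBLoop (d :: tl)
    else pvBLoop rest
  termination_by l => l.length
  decreasing_by
  · have h2 : List.dropWhile pvIsDig rest = d :: tl := by
      simp_all
    have h3 := List.length_dropWhile_le (p := pvIsDig) rest
    simp [h2] at h3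
    simp; omega
  · simp

def problemnumber_alt (filename : String) : Option String :=
  let num := pvBLoop filename.toList
  let num := if num.length > 4 then num.drop (num.length - 4) else num
  if num.length > 0 then some (String.mk num) else none

-- ===== PRECONDITION & SPEC =====
def Spec_problemnumber (filename : String) (out : Option String) : Prop := out = problemnumber_alt filename
instance (filename : String) (out : Option String) : Decidable (Spec_problemnumber filename out) := by unfold Spec_problemnumber; infer_instance

-- ===== CLAIM (what is proved, stated in full; the proofs are below) =====
def Claim_equal_problemnumber : Prop := ∀ (filename : String), Dom_problemnumber filename → Spec_problemnumber filename (problemnumber filename)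

-- ===== LEMMAS AND PROOFS =====

-- A's loop with a nonempty all-digit accumulator finishes the current digit run
theorem pvALoop_run (l acc : List Char) (h : acc ≠ []) :
    pvALoop l acc =
      match l.dropWhile pvIsDig with
      | [] => acc ++ l.takeWhile pvIsDig
      | d :: tl => if d = '.' then acc ++ l.takeWhile pvIsDig else pvALoop tl [] := by
  induction l generalizing acc with
  | nil => simp [pvALoop]
  | cons c rest ih =>
    by_cases hd : pvIsDig c
    · have := ih (acc ++ [c]) (by simp)
      simp [pvALoop, hd, this]
    · have hlen : acc.length > 0 := List.length_pos_iff.mpr h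
      by_cases hdot : c = '.'
      · have h9 : pvIsDig '.' = false := by decide
        simp [pvALoop, hdot, h9, hlen]
      · simp [pvALoop, hd, hdot, hlen]

theorem pvBLoop_eqn (c : Char) (rest : List Char) : pvBLoop (c :: rest) =
    if pvIsDig c then
      match (c :: rest).dropWhile pvIsDig with
      | [] => (c :: rest).takeWhile pvIsDig
      | d :: tl => if d = '.' then (c :: rest).takeWhile pvIsDig else pvBLoop (d :: tl)
    else pvBLoop rest := by
  rw [pvBLoop]
  by_cases h : pvIsDig c <;> simp only [h, if_true, if_false, Bool.false_eq_true]
  cases hq : List.dropWhile pvIsDig (c :: rest) <;> simp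

theorem pvLoop_eq (l : List Char) : pvALoop l [] = pvBLoop l := by
  induction l using pvBLoop.induct with
  | case1 => simp [pvALoop, pvBLoop]
  | case2 c rest hd hdw =>
    have h2 : rest.dropWhile pvIsDig = [] := by
      simpa [List.dropWhile_cons, hd] using hdw
    simp only [pvALoop, hd, if_pos, List.nil_append]
    rw [pvALoop_run _ [c] (by simp)]
    rw [pvBLoop_eqn]
    simp [hd, h2, hdw]
  | case3 c rest hd tl1 hdw =>
    have h2 : rest.dropWhile pvIsDig = '.' :: tl1 := by
      simpa [List.dropWhile_cons, hd] using hdw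
    simp only [pvALoop, hd, if_pos, List.nil_append]
    rw [pvALoop_run _ [c] (by simp)]
    rw [pvBLoop_eqn]
    simp [hd, h2, hdw]
  | case4 c rest hd d tl hdw hdot ih =>
    have h2 : rest.dropWhile pvIsDig = d :: tl := by
      simpa [List.dropWhile_cons, hd] using hdw
    have hnd : ¬ pvIsDig d = true := by
      have := List.head_dropWhile_not (p := pvIsDig) (l := rest) (by simp [h2])
      simpa [h2] using this
    have hA : pvALoop (d :: tl) [] = pvALoop tl [] := by
      simp [pvALoop, hnd]
    simp only [pvALoop, hd, if_pos, List.nil_append]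
    rw [pvALoop_run _ [c] (by simp)]
    rw [pvBLoop_eqn]
    simp only [h2, hdw, hdot, hd, if_true, ← hA, ih]
    simp
  | case5 c rest hd ih =>
    rw [pvBLoop_eqn]
    simp [pvALoop, hd, ih]

-- ===== VERDICT (by name: the statement is the Claim_ definition above) =====
theorem problemnumber_spec : Claim_equal_problemnumber := by
  intro filename _
  unfold Spec_problemnumber problemnumber problemnumber_alt
  rw [pvLoop_eq]
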